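-- pv_equiv track=rewrite | github.com/rkm0959/CTFWriteups | 2021/zh3roCTF/injection.py | calc_idx
-- ===== SOURCE A (Python) =====
-- def kthp(n, k):
-- 	if n == 0:
-- 		return 0
-- 	lef = 1
-- 	rig = 2
-- 	best = 0
-- 	while rig ** k < n:
-- 		rig = rig << 1
-- 	while lef <= rig:
-- 		mid = (lef + rig) // 2
-- 		if mid ** k <= n:
-- 			best = mid
-- 			lef = mid + 1
-- 		else:
-- 			rig = mid - 1
-- 	return best
--
-- def calc_idx(x):
--     # (i+j)(i+j+1) + 2j = 2x
--     # (i+j)^2 + i+j + 2j = 2x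
--     if x < 256:
--         return [x]
--     # (i+j)^2 < 2x
--     v = kthp(2 * x, 2)
--     for tot in [v-3, v-2, v-1, v]:
--         tt = 2 * x - tot * tot - tot
--         if tt % 2 == 0 and tt >= 0:
--             j = tt // 2
--             if 0 <= j <= tot:
--                 return calc_idx(tot - j) + calc_idx(j)
-- ===== SOURCE B (Python) =====
-- def _isqrt(n):
--     # Newton's method integer square root (n >= 0)
--     if n == 0:
--         return 0
--     g = n
--     h = (g + 1) // 2
--     while h < g:
--         g = h
--         h = (g + n // g) // 2
--     return g
--
-- def calc_idx(x):
--     out = []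
--     stack = [x]
--     while stack:
--         y = stack.pop()
--         if y < 256:
--             out.append(y)
--         else:
--             # closed-form inverse Cantor pairing: tot is the unique t with
--             # t(t+1)/2 <= y <= t(t+1)/2 + t, i.e. t = (isqrt(8y+1)-1)//2
--             t = (_isqrt(8 * y + 1) - 1) // 2
--             j = y - t * (t + 1) // 2
--             stack.append(j)
--             stack.append(t - j)
--     return out
-- ===== Notes on version B (the rewrite author's own statement) =====
-- stated objective: alternative
-- what changed: B replaces A's recursive descent (binary-search integer sqrt plus a four-candidate trial loop per node) with an explicit stack loop that splits each node by the closed-form inverse Cantor pairing derived from the integer square root of 8y+1, computed by a Newton-iteration integer square root instead of doubling plus binary search.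
import Mathlib
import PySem

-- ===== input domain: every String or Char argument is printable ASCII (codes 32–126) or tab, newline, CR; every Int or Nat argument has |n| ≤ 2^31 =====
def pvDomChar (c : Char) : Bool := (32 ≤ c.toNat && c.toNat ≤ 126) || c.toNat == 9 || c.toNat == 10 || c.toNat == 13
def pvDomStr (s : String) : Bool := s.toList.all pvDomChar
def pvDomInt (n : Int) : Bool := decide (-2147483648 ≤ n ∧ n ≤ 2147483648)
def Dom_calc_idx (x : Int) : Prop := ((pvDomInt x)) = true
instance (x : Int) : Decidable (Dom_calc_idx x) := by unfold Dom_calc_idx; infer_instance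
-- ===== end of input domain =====

-- B replaces A's recursive descent (binary-search integer sqrt plus a four-candidate trial
-- loop per node) by an explicit stack loop with a closed-form split of each node, derived
-- from the integer square root of 8y+1 computed by a Newton-iteration integer sqrt; objective: alternative decomposition, same cost.


-- ===== PORT A =====
-- Python's unbounded while/recursion is ported with explicit fuel (a totality guard only:
-- the fuel bounds the iteration count and is proved never exhausted on any call made).
def kthpDouble (fuel : Nat) (n k rig : Int) : Int :=
  match fuel with
  | 0 => rig
  | f + 1 => if rig ^ k.toNat < n then kthpDouble f n k (rig * 2) else rig

def kthpSearch (fuel : Nat) (n k lef rig best : Int) : Int :=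
  match fuel with
  | 0 => best
  | f + 1 =>
    if lef ≤ rig then
      let mid := PySem.Int.floordiv (lef + rig) 2
      if mid ^ k.toNat ≤ n then kthpSearch f n k (mid + 1) rig mid
      else kthpSearch f n k lef (mid - 1) best
    else best

-- rig ** k ported as rig ^ k.toNat (exact: k is the literal 2 at every call site)
def kthp (n k : Int) : Int :=
  if n = 0 then 0
  else kthpSearch 100 n k 1 (kthpDouble 100 n k 2) 0

-- the per-candidate test of A's for-loop body;
-- tt = 2*x - tot*tot - tot and j = tt // 2 are written inline (Python's local names)
def tryTot (x tot : Int) : Option Int :=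
  if PySem.Int.mod (2 * x - tot * tot - tot) 2 = 0 ∧ 0 ≤ 2 * x - tot * tot - tot then
    if 0 ≤ PySem.Int.floordiv (2 * x - tot * tot - tot) 2 ∧
        PySem.Int.floordiv (2 * x - tot * tot - tot) 2 ≤ tot then
      some (PySem.Int.floordiv (2 * x - tot * tot - tot) 2)
    else none
  else none

-- A's for-loop over the four candidates [v-3, v-2, v-1, v], unrolled (first match wins)
def findTot (x v : Int) : Option (Int × Int) :=
  match tryTot x (v - 3) with
  | some j => some (v - 3, j)
  | none =>
    match tryTot x (v - 2) with
    | some j => some (v - 2, j)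
    | none =>
      match tryTot x (v - 1) with
      | some j => some (v - 1, j)
      | none =>
        match tryTot x v with
        | some j => some (v, j)
        | none => none

-- recursion with fuel x.toNat + 1 (each recursive argument is strictly smaller, proved below)
def calcIdxFuel (fuel : Nat) (x : Int) : List Int :=
  match fuel with
  | 0 => []
  | f + 1 =>
    if x < 256 then [x]
    else
      match findTot x (kthp (2 * x) 2) with
      | some (tot, j) => calcIdxFuel f (tot - j) ++ calcIdxFuel f j
      | none => []  -- Python returns None here; no call calc_idx makes reaches this branch

def calc_idx (x : Int) : List Int := calcIdxFuel (x.toNat + 1) x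

-- ===== PORT B =====
-- Source B's _isqrt: Newton iteration; the while loop carries (g, h), fuel = n.toNat + 1
-- (g strictly decreases each iteration, proved below)
def newtonLoop (fuel : Nat) (n g h : Int) : Int :=
  match fuel with
  | 0 => g
  | f + 1 =>
    if h < g then
      newtonLoop f n h (PySem.Int.floordiv (h + PySem.Int.floordiv n h) 2)
    else g

def pyIsqrt (n : Int) : Int :=
  if n = 0 then 0
  else newtonLoop (n.toNat + 1) n n (PySem.Int.floordiv (n + 1) 2)

-- Source B's while loop over the stack; head of the list = top of the Python stack (pop/append
-- site); fuel 2*x.toNat + 2 bounds the number of iterations (proved sufficient below)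
def calcAltLoop (fuel : Nat) (stack out : List Int) : List Int :=
  match fuel with
  | 0 => out
  | f + 1 =>
    match stack with
    | [] => out
    | y :: rest =>
      if y < 256 then calcAltLoop f rest (out ++ [y])
      else
        let t := PySem.Int.floordiv (pyIsqrt (8 * y + 1) - 1) 2
        let j := y - PySem.Int.floordiv (t * (t + 1)) 2
        calcAltLoop f ((t - j) :: j :: rest) out

def calc_idx_alt (x : Int) : List Int := calcAltLoop (2 * x.toNat + 2) [x] []

-- ===== PRECONDITION & SPEC =====
def Spec_calc_idx (x : Int) (out : List Int) : Prop := out = calc_idx_alt x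
instance (x : Int) (out : List Int) : Decidable (Spec_calc_idx x out) := by unfold Spec_calc_idx; infer_instance

-- ===== CLAIM (what is proved, stated in full; the proofs are below) =====
def Claim_equal_calc_idx : Prop := ∀ (x : Int), Dom_calc_idx x → Spec_calc_idx x (calc_idx x)

-- ===== LEMMAS AND PROOFS =====

-- the canonical split: t,j with 0 ≤ j ≤ t and t(t+1) + 2j = 2y (unique for y ≥ 0)
def splitP (y t j : Int) : Prop := 0 ≤ j ∧ j ≤ t ∧ t * t + t + 2 * j = 2 * y

theorem splitP_of_tryTot {y t j : Int} (h : tryTot y t = some j) : splitP y t j := by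
  unfold tryTot at h
  split_ifs at h with h1 h2
  · obtain ⟨hm, hnn⟩ := h1
    obtain ⟨hj0, hjt⟩ := h2
    have hj' : PySem.Int.floordiv (2 * y - t * t - t) 2 = j := Option.some.inj h
    have hdm := PySem.Int.floordiv_mul_add_mod (2 * y - t * t - t) 2
    rw [hm, hj'] at hdm
    exact ⟨hj' ▸ hj0, hj' ▸ hjt, by linarith⟩

theorem tryTot_of_splitP {y t j : Int} (h : splitP y t j) : tryTot y t = some j := by
  obtain ⟨hj0, hjt, heq⟩ := h
  have htt : 2 * y - t * t - t = 2 * j := by linarith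
  have hfd : PySem.Int.floordiv (2 * j) 2 = j := by
    rw [PySem.Int.floordiv_eq_iff_of_pos (by norm_num)]; constructor <;> linarith
  have hmod : PySem.Int.mod (2 * j) 2 = 0 := by
    rw [PySem.Int.mod_eq_zero_iff_dvd]; exact ⟨j, rfl⟩
  unfold tryTot
  rw [htt, hfd]
  rw [if_pos ⟨hmod, by linarith⟩, if_pos ⟨hj0, hjt⟩]

theorem splitP_unique {y t j t' j' : Int} (h : splitP y t j) (h' : splitP y t' j') :
    t = t' ∧ j = j' := by
  obtain ⟨hj0, hjt, heq⟩ := h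
  obtain ⟨hj0', hjt', heq'⟩ := h'
  have ht : t = t' := by
    rcases lt_trichotomy t t' with hlt | heqt | hgt
    · nlinarith
    · exact heqt
    · nlinarith
  subst ht
  exact ⟨rfl, by linarith⟩

theorem splitP_bounds {y t j : Int} (hy : 256 ≤ y) (h : splitP y t j) :
    0 ≤ j ∧ 0 ≤ t - j ∧ j < y ∧ t - j < y ∧ t < y := by
  obtain ⟨hj0, hjt, heq⟩ := h
  have ht : t < y := by nlinarith
  exact ⟨hj0, by linarith, by linarith, by linarith, ht⟩

theorem findTot_eq {y v t j : Int} (h : splitP y t j) (h1 : v - 3 ≤ t) (h2 : t ≤ v) :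
    findTot y v = some (t, j) := by
  have ht : tryTot y t = some j := tryTot_of_splitP h
  unfold findTot
  rcases e3 : tryTot y (v - 3) with _ | j3
  · rcases e2 : tryTot y (v - 2) with _ | j2
    · rcases e1 : tryTot y (v - 1) with _ | j1
      · rcases e0 : tryTot y v with _ | j0
        · exfalso
          have : t = v - 3 ∨ t = v - 2 ∨ t = v - 1 ∨ t = v := by omega
          rcases this with rfl | rfl | rfl | rfl <;> simp_all
        · obtain ⟨rfl, rfl⟩ := splitP_unique h (splitP_of_tryTot e0)
          rfl
      · obtain ⟨rfl, rfl⟩ := splitP_unique h (splitP_of_tryTot e1)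
        rfl
    · obtain ⟨rfl, rfl⟩ := splitP_unique h (splitP_of_tryTot e2)
      rfl
  · obtain ⟨rfl, rfl⟩ := splitP_unique h (splitP_of_tryTot e3)
    rfl

-- ===== A-side: kthp computes the integer square root =====

theorem pow_toNat_two (a : Int) : a ^ (2 : Int).toNat = a * a := by
  have h : (2 : Int).toNat = 2 := rfl
  rw [h]; ring

theorem kthpDouble_spec (n : Int) :
    ∀ (f : Nat) (rig : Int), 2 ≤ rig → n ≤ rig * rig * 4 ^ f →
      2 ≤ kthpDouble f n 2 rig ∧ n ≤ kthpDouble f n 2 rig * kthpDouble f n 2 rig ∧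
        (kthpDouble f n 2 rig = rig ∨
          kthpDouble f n 2 rig * kthpDouble f n 2 rig < 4 * n) := by
  intro f
  induction f with
  | zero =>
    intro rig h2 hn
    simp only [kthpDouble]
    exact ⟨h2, by nlinarith, by simp⟩
  | succ f ih =>
    intro rig h2 hn
    simp only [kthpDouble]
    by_cases hc : rig ^ (2 : Int).toNat < n
    · rw [if_pos hc]
      have h2' : 2 ≤ rig * 2 := by linarith
      have hn' : n ≤ (rig * 2) * (rig * 2) * 4 ^ f := by
        have : rig * rig * 4 ^ (f + 1) = (rig * 2) * (rig * 2) * 4 ^ f := by ring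
        linarith [this ▸ hn]
      obtain ⟨a, b, c⟩ := ih (rig * 2) h2' hn'
      refine ⟨a, b, ?_⟩
      rcases c with hc' | hc'
      · right
        rw [hc']
        have : rig ^ (2 : Int).toNat = rig * rig := pow_toNat_two rig
        nlinarith [this ▸ hc]
      · right; exact hc'
    · rw [if_neg hc]
      push_neg at hc
      have hsq : rig ^ (2 : Int).toNat = rig * rig := pow_toNat_two rig
      exact ⟨h2, hsq ▸ hc, by simp⟩

theorem kthpSearch_spec (n : Int) :
    ∀ (f : Nat) (lef rig best : Int), best = lef - 1 → 0 ≤ best → best * best ≤ n →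
      n < (rig + 1) * (rig + 1) → -1 ≤ rig → rig + 1 - lef ≤ 2 ^ f - 1 →
      0 ≤ kthpSearch f n 2 lef rig best ∧
        kthpSearch f n 2 lef rig best * kthpSearch f n 2 lef rig best ≤ n ∧
        n < (kthpSearch f n 2 lef rig best + 1) * (kthpSearch f n 2 lef rig best + 1) := by
  intro f
  induction f with
  | zero =>
    intro lef rig best hb hb0 hbn hrn hr1 hfuel
    simp only [kthpSearch]
    have hlr : rig < lef := by omega
    have : (rig + 1) * (rig + 1) ≤ (best + 1) * (best + 1) := by nlinarith
    exact ⟨hb0, hbn, by linarith⟩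
  | succ f ih =>
    intro lef rig best hb hb0 hbn hrn hr1 hfuel
    simp only [kthpSearch]
    by_cases hlr : lef ≤ rig
    · rw [if_pos hlr]
      have hmid := PySem.Int.floordiv_two_mid_bounds hlr
      set mid := PySem.Int.floordiv (lef + rig) 2 with hmiddef
      have hdm := PySem.Int.floordiv_mul_add_mod (lef + rig) 2
      have hm0 := PySem.Int.mod_nonneg (lef + rig) (b := 2) (by norm_num)
      have hm2 := PySem.Int.mod_lt (lef + rig) (b := 2) (by norm_num)
      have hpow : (2 : Int) ^ (f + 1) = 2 * 2 ^ f := by ring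
      have hp1 : (0 : Int) < 2 ^ f := by positivity
      by_cases hc : mid ^ (2 : Int).toNat ≤ n
      · rw [if_pos hc]
        have hsq : mid ^ (2 : Int).toNat = mid * mid := pow_toNat_two mid
        refine ih (mid + 1) rig mid (by ring) (by omega) (hsq ▸ hc) hrn hr1 ?_
        rw [hpow] at hfuel
        omega
      · rw [if_neg hc]
        push_neg at hc
        have hsq : mid ^ (2 : Int).toNat = mid * mid := pow_toNat_two mid
        refine ih lef (mid - 1) best hb hb0 hbn (by rw [sub_add_cancel]; exact hsq ▸ hc)
          (by omega) ?_
        rw [hpow] at hfuel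
        omega
    · rw [if_neg hlr]
      push_neg at hlr
      have : (rig + 1) * (rig + 1) ≤ (best + 1) * (best + 1) := by nlinarith
      exact ⟨hb0, hbn, by linarith⟩

theorem kthp_spec (n : Int) (hn : 512 ≤ n) (hub : n ≤ 2 ^ 33) :
    0 ≤ kthp n 2 ∧ kthp n 2 * kthp n 2 ≤ n ∧ n < (kthp n 2 + 1) * (kthp n 2 + 1) := by
  have hne : n ≠ 0 := by omega
  unfold kthp
  rw [if_neg hne]
  have hdbl := kthpDouble_spec n 100 2 (by norm_num)
    (by
      have : (2 : Int) * 2 * 4 ^ 100 = 2 ^ 202 := by norm_num [pow_succ]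
      rw [this]
      calc n ≤ 2 ^ 33 := hub
        _ ≤ 2 ^ 202 := by norm_num)
  set rig := kthpDouble 100 n 2 2 with hrdef
  obtain ⟨hr2, hrn, hror⟩ := hdbl
  have hrub : rig ≤ 2 ^ 18 := by
    rcases hror with h | h
    · rw [h]; norm_num
    · nlinarith [hub]
  exact kthpSearch_spec n 100 1 rig 0 (by ring) le_rfl (by linarith) (by nlinarith)
    (by linarith) (by norm_num; omega)

-- ===== B-side: Newton iteration computes the integer square root =====

theorem newtonStep_ge (n g s : Int) (hg : 1 ≤ g) (hs : 0 ≤ s) (hsn : s * s ≤ n) :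
    s ≤ PySem.Int.floordiv (g + PySem.Int.floordiv n g) 2 := by
  set q := PySem.Int.floordiv n g with hq
  rw [PySem.Int.le_floordiv_iff_mul_le (by norm_num)]
  have hdm := PySem.Int.floordiv_mul_add_mod n g
  have hm0 := PySem.Int.mod_nonneg n (b := g) (by linarith)
  have hmg := PySem.Int.mod_lt n (b := g) (by linarith)
  by_contra hcon
  push_neg at hcon
  nlinarith [sq_nonneg (g - s)]

theorem newtonLoop_eq (n s : Int) (hn : 1 ≤ n) (hs : 1 ≤ s) (h1 : s * s ≤ n)
    (h2 : n < (s + 1) * (s + 1)) :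
    ∀ (f : Nat) (g : Int), s ≤ g → g - s ≤ (f : Int) →
      newtonLoop f n g (PySem.Int.floordiv (g + PySem.Int.floordiv n g) 2) = s := by
  intro f
  induction f with
  | zero =>
    intro g hsg hgf
    have : g = s := by omega
    simp [newtonLoop, this]
  | succ f ih =>
    intro g hsg hgf
    set h := PySem.Int.floordiv (g + PySem.Int.floordiv n g) 2 with hh
    simp only [newtonLoop]
    by_cases hlt : h < g
    · rw [if_pos hlt]
      have hsh : s ≤ h := newtonStep_ge n g s (by linarith) (by linarith) h1
      exact ih h hsh (by push_cast; omega)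
    · rw [if_neg hlt]
      push_neg at hlt
      -- g ≤ h means g + n//g ≥ 2g, hence n//g ≥ g, hence g*g ≤ n, hence g ≤ s
      rw [hh, PySem.Int.le_floordiv_iff_mul_le (by norm_num)] at hlt
      have hgq : g ≤ PySem.Int.floordiv n g := by linarith
      rw [PySem.Int.le_floordiv_iff_mul_le (by linarith)] at hgq
      have : g ≤ s := by nlinarith
      omega

theorem pyIsqrt_eq (n s : Int) (hn : 1 ≤ n) (hs : 0 ≤ s) (h1 : s * s ≤ n)
    (h2 : n < (s + 1) * (s + 1)) : pyIsqrt n = s := by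
  have hne : n ≠ 0 := by omega
  have hs1 : 1 ≤ s := by nlinarith
  have hsn : s ≤ n := by nlinarith
  unfold pyIsqrt
  rw [if_neg hne]
  have hnn : PySem.Int.floordiv n n = 1 := by
    rw [PySem.Int.floordiv_eq_iff_of_pos (by linarith)]
    constructor <;> linarith
  have hinit : PySem.Int.floordiv (n + 1) 2 =
      PySem.Int.floordiv (n + PySem.Int.floordiv n n) 2 := by rw [hnn]
  rw [hinit]
  refine newtonLoop_eq n s hn hs1 h1 h2 (n.toNat + 1) n hsn ?_
  have := Int.toNat_of_nonneg (le_of_lt (by linarith : (0 : Int) < n))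
  push_cast
  omega

-- ===== the two node computations agree =====

theorem t_range (y t v : Int) (ht0 : 0 ≤ t) (htl : t * t + t ≤ 2 * y)
    (htu : 2 * y ≤ t * t + 3 * t + 1) (hv0 : 0 ≤ v) (hv1 : v * v ≤ 2 * y)
    (hv2 : 2 * y < (v + 1) * (v + 1)) : v - 3 ≤ t ∧ t ≤ v := by
  have h1 : t ≤ v := by nlinarith
  have h2 : v ≤ t + 1 := by nlinarith
  exact ⟨by omega, h1⟩

theorem node_split (y : Int) (hy : 256 ≤ y) (hub : y ≤ 2147483648) :
    splitP y (PySem.Int.floordiv (pyIsqrt (8 * y + 1) - 1) 2)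
      (y - PySem.Int.floordiv
        (PySem.Int.floordiv (pyIsqrt (8 * y + 1) - 1) 2 *
          (PySem.Int.floordiv (pyIsqrt (8 * y + 1) - 1) 2 + 1)) 2) ∧
    findTot y (kthp (2 * y) 2) =
      some (PySem.Int.floordiv (pyIsqrt (8 * y + 1) - 1) 2,
        y - PySem.Int.floordiv
          (PySem.Int.floordiv (pyIsqrt (8 * y + 1) - 1) 2 *
            (PySem.Int.floordiv (pyIsqrt (8 * y + 1) - 1) 2 + 1)) 2) := by
  -- the integer square root of 8y+1 via Nat.sqrt
  set m := (8 * y + 1).toNat with hm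
  have hmy : (m : Int) = 8 * y + 1 := Int.toNat_of_nonneg (by linarith)
  set s := ((Nat.sqrt m : Nat) : Int) with hsdef
  have hs0 : 0 ≤ s := by positivity
  have hs1 : s * s ≤ 8 * y + 1 := by
    rw [← hmy]
    have h := Nat.sqrt_le' m
    zify at h
    nlinarith [h]
  have hs2 : 8 * y + 1 < (s + 1) * (s + 1) := by
    rw [← hmy]
    have h := Nat.lt_succ_sqrt' m
    zify at h
    nlinarith [h]
  have hr : pyIsqrt (8 * y + 1) = s := pyIsqrt_eq _ s (by linarith) hs0 hs1 hs2
  rw [hr]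
  -- t = (s-1)//2, so s = 2t+1+e with e ∈ {0,1}
  set t := PySem.Int.floordiv (s - 1) 2 with ht
  have hdm := PySem.Int.floordiv_mul_add_mod (s - 1) 2
  have hm0 := PySem.Int.mod_nonneg (s - 1) (b := 2) (by norm_num)
  have hm2 := PySem.Int.mod_lt (s - 1) (b := 2) (by norm_num)
  rw [← ht] at hdm
  have hts1 : 2 * t + 1 ≤ s := by omega
  have hts2 : s ≤ 2 * t + 2 := by omega
  have htl : t * t + t ≤ 2 * y := by nlinarith
  have htu : 2 * y ≤ t * t + 3 * t + 1 := by nlinarith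
  -- t(t+1) is even
  obtain ⟨u, hu⟩ : 2 ∣ t * (t + 1) := (Int.even_mul_succ_self t).two_dvd
  have hfd : PySem.Int.floordiv (t * (t + 1)) 2 = u := by
    rw [PySem.Int.floordiv_eq_iff_of_pos (by norm_num)]
    constructor <;> nlinarith
  rw [hfd]
  have hsplit : splitP y t (y - u) := by
    refine ⟨by nlinarith, by nlinarith, by nlinarith⟩
  refine ⟨hsplit, ?_⟩
  -- the A side: v = isqrt(2y) and t ∈ [v-3, v]
  obtain ⟨hv0, hv1, hv2⟩ := kthp_spec (2 * y) (by linarith)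
    (by norm_num; linarith)
  set v := kthp (2 * y) 2 with hv
  have ht0 : 0 ≤ t := by
    obtain ⟨hj0, hjt, _⟩ := hsplit; linarith
  obtain ⟨hrange1, hrange2⟩ := t_range y t v ht0 htl htu hv0 hv1 hv2
  exact findTot_eq hsplit hrange1 hrange2

-- ===== A-side recursion equations =====

theorem fuel_irrel (n : Nat) :
    ∀ (x : Int) (f g : Nat), x.toNat ≤ n → n < f → n < g →
      calcIdxFuel f x = calcIdxFuel g x := by
  induction n with
  | zero =>
    intro x f g hx hf hg
    cases f with
    | zero => omega
    | succ f =>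
      cases g with
      | zero => omega
      | succ g =>
        have hx2 : x < 256 := by omega
        simp [calcIdxFuel, hx2]
  | succ n ih =>
    intro x f g hx hf hg
    cases f with
    | zero => omega
    | succ f =>
      cases g with
      | zero => omega
      | succ g =>
        by_cases hx2 : x < 256
        · simp [calcIdxFuel, hx2]
        · simp only [calcIdxFuel, if_neg hx2]
          cases h : findTot x (kthp (2 * x) 2) with
          | none => rfl
          | some p =>
            obtain ⟨tot, j⟩ := p
            have hTry : tryTot x tot = some j := by
                -- first matching candidate satisfies tryTot
                unfold findTot at h
                rcases e3 : tryTot x (kthp (2*x) 2 - 3) with _ | j3 <;> rw [e3] at h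
                · rcases e2 : tryTot x (kthp (2*x) 2 - 2) with _ | j2 <;> rw [e2] at h
                  · rcases e1 : tryTot x (kthp (2*x) 2 - 1) with _ | j1 <;> rw [e1] at h
                    · rcases e0 : tryTot x (kthp (2*x) 2) with _ | j0 <;> rw [e0] at h
                      · exact absurd h (by simp)
                      · simp only [Option.some.injEq, Prod.mk.injEq] at h
                        obtain ⟨rfl, rfl⟩ := h; exact e0
                    · simp only [Option.some.injEq, Prod.mk.injEq] at h
                      obtain ⟨rfl, rfl⟩ := h; exact e1
                  · simp only [Option.some.injEq, Prod.mk.injEq] at h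
                    obtain ⟨rfl, rfl⟩ := h; exact e2
                · simp only [Option.some.injEq, Prod.mk.injEq] at h
                  obtain ⟨rfl, rfl⟩ := h; exact e3
            obtain ⟨h1, h2, h3, h4, h5⟩ :=
              splitP_bounds (show (256:Int) ≤ x by omega) (splitP_of_tryTot hTry)
            show calcIdxFuel f (tot - j) ++ calcIdxFuel f j =
              calcIdxFuel g (tot - j) ++ calcIdxFuel g j
            rw [ih (tot - j) f g (by omega) (by omega) (by omega),
                ih j f g (by omega) (by omega) (by omega)]

theorem fuel_eq_calc (x : Int) (f : Nat) (hf : x.toNat < f) :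
    calcIdxFuel f x = calc_idx x :=
  fuel_irrel x.toNat x f (x.toNat + 1) le_rfl hf (by omega)

theorem calc_idx_small {y : Int} (hy : y < 256) : calc_idx y = [y] := by
  simp [calc_idx, calcIdxFuel, hy]

theorem calc_idx_big {y t j : Int} (hy : ¬ y < 256)
    (h : findTot y (kthp (2 * y) 2) = some (t, j)) (hP : splitP y t j) :
    calc_idx y = calc_idx (t - j) ++ calc_idx j := by
  obtain ⟨h1, h2, h3, h4, h5⟩ := splitP_bounds (by omega) hP
  show calcIdxFuel (y.toNat + 1) y = _
  simp only [calcIdxFuel, if_neg hy, h]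
  rw [fuel_eq_calc _ _ (by omega), fuel_eq_calc _ _ (by omega)]

-- ===== B-side loop invariant =====

-- proof-side measure: every loop iteration strictly decreases it
def stackMeasure (stack : List Int) : Nat := (stack.map (fun y => y.toNat * 2 + 1)).sum

theorem loop_eq (f : Nat) :
    ∀ (stack out : List Int), stackMeasure stack < f →
      (∀ y ∈ stack, y ≤ 2147483648) →
      calcAltLoop f stack out = out ++ stack.flatMap calc_idx := by
  induction f with
  | zero => intro stack out h _; omega
  | succ f ih =>
    intro stack out h hbd
    match stack with
    | [] => simp [calcAltLoop]
    | y :: rest =>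
      by_cases hy : y < 256
      · simp only [calcAltLoop, if_pos hy]
        rw [ih rest (out ++ [y]) (by simp [stackMeasure] at h ⊢; omega)
            (fun z hz => hbd z (List.mem_cons_of_mem _ hz))]
        rw [List.flatMap_cons, calc_idx_small hy]
        simp
      · obtain ⟨hP, hft⟩ := node_split y (by omega) (hbd y (List.mem_cons_self))
        set t := PySem.Int.floordiv (pyIsqrt (8 * y + 1) - 1) 2 with htd
        set j := y - PySem.Int.floordiv (t * (t + 1)) 2 with hjd
        obtain ⟨h1, h2, h3, h4, h5⟩ := splitP_bounds (by omega) hP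
        simp only [calcAltLoop, if_neg hy]
        rw [ih ((t - j) :: j :: rest) out
            (by simp [stackMeasure] at h ⊢; omega)
            (by
              intro z hz
              simp only [List.mem_cons] at hz
              rcases hz with rfl | rfl | hz
              · have := hbd y List.mem_cons_self; omega
              · have := hbd y List.mem_cons_self; omega
              · exact hbd z (List.mem_cons_of_mem _ hz))]
        conv_rhs => rw [List.flatMap_cons, calc_idx_big hy hft hP]
        simp [List.flatMap_cons]

-- ===== VERDICT (by name: the statement is the Claim_ definition above) =====
theorem calc_idx_spec : Claim_equal_calc_idx := by
  intro x hdom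
  have hx : x ≤ 2147483648 := by
    simp [Dom_calc_idx, pvDomInt] at hdom; exact hdom.2
  unfold Spec_calc_idx calc_idx_alt
  rw [loop_eq _ [x] [] (by simp [stackMeasure]; omega)
      (by intro y hy; simp at hy; omega)]
  simp
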